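-- pv_equiv track=rewrite | github.com/long21wt/scaffold-effect | src/inference_explain.py | find_category_token_idx
-- ===== SOURCE A (Python) =====
-- from typing import Any, Dict, List, Optional, Tuple
--
-- def find_category_token_idx(generated_tokens: List[str]) -> Optional[int]:
--     """
--     Robustly find the index of the label token ('Major' or 'Control')
--     that is the value of the 'category' JSON key.
--
--     Strategy: scan for the 'category' key then take the first label
--     token that appears after it — ignoring any later occurrences inside
--     the explanation field.
--     """
--     category_key_idx = None
--     for i, token in enumerate(generated_tokens):
--         if "category" in token.lower():
--             category_key_idx = i
--             break
--
--     if category_key_idx is None: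
--         return None
--
--     for i in range(category_key_idx + 1, len(generated_tokens)):
--         if generated_tokens[i].strip().strip('"') in ["Major", "Control"]:
--             return i
--
--     return None
-- ===== SOURCE B (Python) =====
-- def find_category_token_idx(generated_tokens):
--     """Right-to-left pass with two accumulators: `cand` is the earliest label
--     index strictly to the right of the current position; each category hit
--     overwrites `res` with `cand`, so the final `res` corresponds to the
--     leftmost category occurrence."""
--     res = None
--     cand = None
--     for i in range(len(generated_tokens) - 1, -1, -1):
--         t = generated_tokens[i]
--         if "category" in t.lower():
--             res = cand
--         if t.strip().strip('"') in ("Major", "Control"):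
--             cand = i
--     return res
-- ===== Notes on version B (the rewrite author's own statement) =====
-- stated objective: alternative
-- what changed: A's forward two-phase scan (find the first 'category' token, then rescan forward for the first label) is replaced by a single right-to-left fold with two accumulators: the earliest label index in the suffix, and the answer overwritten at each category hit so the leftmost category wins.
import Mathlib
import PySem

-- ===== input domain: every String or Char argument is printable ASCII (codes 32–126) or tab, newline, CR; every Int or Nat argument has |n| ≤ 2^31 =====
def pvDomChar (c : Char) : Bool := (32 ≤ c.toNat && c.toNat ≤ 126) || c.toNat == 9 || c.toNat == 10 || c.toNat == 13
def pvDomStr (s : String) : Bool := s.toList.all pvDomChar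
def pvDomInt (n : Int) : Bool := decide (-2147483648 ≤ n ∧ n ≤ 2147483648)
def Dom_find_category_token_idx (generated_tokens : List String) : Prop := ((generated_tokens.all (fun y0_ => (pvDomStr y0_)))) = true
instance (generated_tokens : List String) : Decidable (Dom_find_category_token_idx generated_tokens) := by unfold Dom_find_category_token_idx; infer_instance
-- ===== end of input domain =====

-- B replaces A's forward two-phase scan by one right-to-left pass with two accumulators (objective: alternative).

-- "category" in token.lower()
def pvHit (t : String) : Bool := PySem.Str.isIn "category" (PySem.Str.lower t)

-- token.strip().strip('"') in ["Major", "Control"]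
def pvIsLabel (t : String) : Bool :=
  ["Major", "Control"].contains (PySem.Str.stripChars (PySem.Str.strip t) "\"")

-- ===== PORT A =====
-- first loop: enumerate with break, recording category_key_idx
def pvCatScan : List String → Int → Option Int
  | [], _ => none
  | t :: rest, i => if pvHit t then some i else pvCatScan rest (i + 1)

-- second loop: for i in range(category_key_idx+1, len(generated_tokens)): if label: return i
def pvIdxLoop (xs : List String) : List Int → Option Int
  | [] => none
  | i :: rest => if pvIsLabel (PySem.List.pyGetD xs i "") then some i else pvIdxLoop xs rest

def find_category_token_idx (generated_tokens : List String) : Option Int :=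
  match pvCatScan generated_tokens 0 with
  | none => none
  | some k => pvIdxLoop generated_tokens (PySem.List.pyRange (k + 1) (generated_tokens.length : Int) 1)

-- ===== PORT B =====
-- the descending-index loop of Source B: the tail (higher indices) is processed first,
-- then the state (res, cand) is updated at the current index, exactly as the loop body does
def pvRev : List String → Int → Option Int × Option Int
  | [], _ => (none, none)
  | t :: rest, i =>
    let s := pvRev rest (i + 1)
    let res' := if pvHit t then s.2 else s.1
    let cand' := if pvIsLabel t then some i else s.2
    (res', cand')

def find_category_token_idx_alt (generated_tokens : List String) : Option Int :=
  (pvRev generated_tokens 0).1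

-- ===== PRECONDITION & SPEC =====
def Spec_find_category_token_idx (generated_tokens : List String) (out : Option Int) : Prop := out = find_category_token_idx_alt generated_tokens
instance (generated_tokens : List String) (out : Option Int) : Decidable (Spec_find_category_token_idx generated_tokens out) := by unfold Spec_find_category_token_idx; infer_instance

-- ===== CLAIM (what is proved, stated in full; the proofs are below) =====
def Claim_equal_find_category_token_idx : Prop := ∀ (generated_tokens : List String), Dom_find_category_token_idx generated_tokens → Spec_find_category_token_idx generated_tokens (find_category_token_idx generated_tokens)

-- ===== LEMMAS AND PROOFS =====

-- forward characterisations used only by the proof: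
-- first label index at or after position a
def pvLabScan : List String → Int → Option Int
  | [], _ => none
  | t :: rest, i => if pvIsLabel t then some i else pvLabScan rest (i + 1)

-- A's combined behaviour on a suffix: after the first category hit, first label strictly later
def pvAfterCat : List String → Int → Option Int
  | [], _ => none
  | t :: rest, i => if pvHit t then pvLabScan rest (i + 1) else pvAfterCat rest (i + 1)

-- B's backward pass computes exactly (pvAfterCat, pvLabScan)
lemma pvRev_eq (xs : List String) : ∀ a : Int, pvRev xs a = (pvAfterCat xs a, pvLabScan xs a) := by
  induction xs with
  | nil => intro a; rfl
  | cons t rest ih =>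
    intro a
    simp only [pvRev, pvAfterCat, pvLabScan, ih (a + 1)]

-- A's second loop over range(a, len) equals the forward label scan on the suffix from a.
lemma pvIdxLoop_eq_labScan (full : List String) :
    ∀ (suffix : List String) (a : Int), 0 ≤ a → full.drop a.toNat = suffix →
      pvIdxLoop full (PySem.List.pyRange a (full.length : Int) 1) = pvLabScan suffix a := by
  intro suffix
  induction suffix with
  | nil =>
    intro a ha hdrop
    have hlen : (full.length : Int) ≤ a := by
      have := List.drop_eq_nil_iff.mp hdrop
      omega
    rw [PySem.List.pyRange_one_eq_nil hlen]
    rfl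
  | cons t rest ih =>
    intro a ha hdrop
    have hlt : a.toNat < full.length := by
      by_contra h
      rw [List.drop_eq_nil_of_le (Nat.le_of_not_lt h)] at hdrop
      exact absurd hdrop (by simp)
    have hltI : a < (full.length : Int) := by omega
    rw [PySem.List.pyRange_one_cons hltI]
    have hcons : full[a.toNat] :: full.drop (a.toNat + 1) = t :: rest := by
      rw [← List.drop_eq_getElem_cons hlt]; exact hdrop
    have hget : PySem.List.pyGetD full a "" = t := by
      rw [PySem.List.pyGetD_eq_getElem full "" ha (by exact_mod_cast hltI)]
      exact (List.cons.injEq _ _ _ _ ▸ hcons).1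
    have hdrop' : full.drop (a + 1).toNat = rest := by
      have h1 : (a + 1).toNat = a.toNat + 1 := by omega
      rw [h1]
      exact (List.cons.injEq _ _ _ _ ▸ hcons).2
    simp only [pvIdxLoop, pvLabScan, hget]
    by_cases hl : pvIsLabel t
    · simp [hl]
    · simp [hl, ih (a + 1) (by omega) hdrop']

-- A's two-phase forward computation equals pvAfterCat, on any suffix
lemma pv_main (full : List String) :
    ∀ (suffix : List String) (a : Int), 0 ≤ a → full.drop a.toNat = suffix →
      (match pvCatScan suffix a with
       | none => none
       | some k => pvIdxLoop full (PySem.List.pyRange (k + 1) (full.length : Int) 1)) =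
      pvAfterCat suffix a := by
  intro suffix
  induction suffix with
  | nil => intro a _ _; rfl
  | cons t rest ih =>
    intro a ha hdrop
    have hlt : a.toNat < full.length := by
      by_contra h
      rw [List.drop_eq_nil_of_le (Nat.le_of_not_lt h)] at hdrop
      exact absurd hdrop (by simp)
    have hcons : full[a.toNat] :: full.drop (a.toNat + 1) = t :: rest := by
      rw [← List.drop_eq_getElem_cons hlt]; exact hdrop
    have hdrop' : full.drop (a + 1).toNat = rest := by
      have h1 : (a + 1).toNat = a.toNat + 1 := by omega
      rw [h1]
      exact (List.cons.injEq _ _ _ _ ▸ hcons).2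
    simp only [pvCatScan, pvAfterCat]
    by_cases hh : pvHit t
    · simp only [hh, if_true]
      exact pvIdxLoop_eq_labScan full rest (a + 1) (by omega) hdrop'
    · simp only [hh, if_false, Bool.false_eq_true]
      exact ih (a + 1) (by omega) hdrop'

-- ===== VERDICT (by name: the statement is the Claim_ definition above) =====
theorem find_category_token_idx_spec : Claim_equal_find_category_token_idx := by
  intro xs _
  show find_category_token_idx xs = find_category_token_idx_alt xs
  unfold find_category_token_idx find_category_token_idx_alt
  rw [pvRev_eq xs 0]
  exact pv_main xs xs 0 le_rfl (by simp)
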